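-- pv_equiv track=rewrite | github.com/denesbartha/RDRT | reconstruct_drt.py | proper_coefficient_list
-- ===== SOURCE A (Python) =====
-- def proper_coefficient_list(pl):
--     length = len(pl)
--     index = 1
--     if pl[0] != 1 or pl[-1] != 1:
--         return False
--     while index < length and pl[index - 1] <= pl[index]:
--         index += 1
--     if index <= 1:
--         return False
--     while index < length and pl[index - 1] >= pl[index]:
--         index += 1
--     return index >= length
-- ===== SOURCE B (Python) =====
-- def proper_coefficient_list(pl):
--     if pl[0] != 1 or pl[-1] != 1:
--         return False
--     if len(pl) == 1:
--         return False
--     diffs = [pl[i] - pl[i - 1] for i in range(1, len(pl))]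
--     if diffs[0] < 0:
--         return False
--     seen_decrease = False
--     for d in diffs:
--         if d < 0:
--             seen_decrease = True
--         elif d > 0 and seen_decrease:
--             return False
--     return True
-- ===== Notes on version B (the rewrite author's own statement) =====
-- stated objective: alternative
-- what changed: Replaces A's two index-walking while loops (climb then descend) by building the derived difference list once and scanning it in a single pass with a seen_decrease state flag.
import Mathlib
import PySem

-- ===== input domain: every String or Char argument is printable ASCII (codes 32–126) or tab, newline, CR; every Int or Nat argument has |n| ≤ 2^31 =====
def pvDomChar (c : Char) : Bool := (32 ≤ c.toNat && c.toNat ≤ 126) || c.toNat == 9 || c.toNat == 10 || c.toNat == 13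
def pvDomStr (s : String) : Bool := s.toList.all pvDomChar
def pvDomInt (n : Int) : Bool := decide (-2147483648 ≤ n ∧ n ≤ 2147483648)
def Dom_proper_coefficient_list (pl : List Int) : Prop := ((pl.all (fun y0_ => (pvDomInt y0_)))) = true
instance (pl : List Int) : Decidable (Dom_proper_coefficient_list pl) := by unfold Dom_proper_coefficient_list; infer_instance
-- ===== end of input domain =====

-- B replaces A's two index-walking while loops by a difference list plus a single
-- state-flag scan (objective: alternative decomposition, same O(n) cost).


-- ===== PORT A =====
-- while index < length and pl[index - 1] <= pl[index]: index += 1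
def pclLoop1 (pl : List Int) (length index : Int) : Int :=
  if h : index < length ∧ PySem.List.pyGetD pl (index - 1) 0 ≤ PySem.List.pyGetD pl index 0 then
    pclLoop1 pl length (index + 1)
  else index
termination_by (length - index).toNat
decreasing_by omega

-- while index < length and pl[index - 1] >= pl[index]: index += 1
def pclLoop2 (pl : List Int) (length index : Int) : Int :=
  if h : index < length ∧ PySem.List.pyGetD pl (index - 1) 0 ≥ PySem.List.pyGetD pl index 0 then
    pclLoop2 pl length (index + 1)
  else index
termination_by (length - index).toNat
decreasing_by omega

def proper_coefficient_list (pl : List Int) : Bool :=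
  let length : Int := pl.length
  -- pl[0], pl[-1]: in-range under Pre_ (pl ≠ []), so the total pyGetD form is exact there
  if PySem.List.pyGetD pl 0 0 ≠ 1 ∨ PySem.List.pyGetD pl (-1) 0 ≠ 1 then false
  else
    let index := pclLoop1 pl length 1
    if index ≤ 1 then false
    else decide (pclLoop2 pl length index ≥ length)

-- ===== PORT B =====
-- pl[i] - pl[i-1]
def pclDiff (pl : List Int) (i : Int) : Int :=
  PySem.List.pyGetD pl i 0 - PySem.List.pyGetD pl (i - 1) 0

-- diffs = [pl[i] - pl[i-1] for i in range(1, len(pl))]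
def pclDiffs (pl : List Int) : List Int :=
  (PySem.List.pyRange 1 pl.length 1).map (pclDiff pl)

-- for d in diffs: set/consult the seen_decrease flag
def pclScan : List Int → Bool → Bool
  | [], _ => true
  | d :: ds, seen =>
    if d < 0 then pclScan ds true
    else if 0 < d ∧ seen = true then false
    else pclScan ds seen

def proper_coefficient_list_alt (pl : List Int) : Bool :=
  if PySem.List.pyGetD pl 0 0 ≠ 1 ∨ PySem.List.pyGetD pl (-1) 0 ≠ 1 then false
  else if pl.length == 1 then false
  else if PySem.List.pyGetD (pclDiffs pl) 0 0 < 0 then false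
  else pclScan (pclDiffs pl) false

-- ===== PRECONDITION & SPEC =====
-- A raises IndexError on the empty list (pl[0]); B raises there too, so Pre_ excludes exactly it.
def Pre_proper_coefficient_list (pl : List Int) : Prop := pl ≠ []
instance (pl : List Int) : Decidable (Pre_proper_coefficient_list pl) := by unfold Pre_proper_coefficient_list; infer_instance
def pvWitness_proper_coefficient_list : List Int := [1, 2, 1]
def Spec_proper_coefficient_list (pl : List Int) (out : Bool) : Prop := out = proper_coefficient_list_alt pl
instance (pl : List Int) (out : Bool) : Decidable (Spec_proper_coefficient_list pl out) := by unfold Spec_proper_coefficient_list; infer_instance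

-- ===== CLAIM (what is proved, stated in full; the proofs are below) =====
def Claim_equal_proper_coefficient_list : Prop := ∀ (pl : List Int), Dom_proper_coefficient_list pl → Pre_proper_coefficient_list pl → Spec_proper_coefficient_list pl (proper_coefficient_list pl)

-- ===== LEMMAS AND PROOFS =====
theorem pcl_loop1_ge (pl : List Int) (length : Int) : ∀ index : Int, index ≤ pclLoop1 pl length index := by
  intro index
  fun_induction pclLoop1 pl length index with
  | case1 index h ih => omega
  | case2 index h => omega

theorem pcl_loop2_scan (pl : List Int) : ∀ n : Nat, ∀ index : Int, 1 ≤ index →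
    ((pl.length : Int) - index).toNat = n →
    decide ((pl.length : Int) ≤ pclLoop2 pl pl.length index) =
      pclScan ((PySem.List.pyRange index pl.length 1).map (pclDiff pl)) true := by
  intro n
  induction n with
  | zero =>
    intro index h1 hn
    rw [pclLoop2, PySem.List.pyRange_one_eq_nil (by omega)]
    simp [pclScan]
    omega
  | succ m ih =>
    intro index h1 hn
    have hlt : index < (pl.length : Int) := by omega
    rw [pclLoop2, PySem.List.pyRange_one_cons hlt]
    by_cases hc : PySem.List.pyGetD pl (index - 1) 0 ≥ PySem.List.pyGetD pl index 0
    · rw [dif_pos ⟨hlt, hc⟩]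
      rw [ih (index + 1) (by omega) (by omega)]
      simp only [List.map_cons, pclScan, pclDiff]
      split_ifs with h2 h3 <;> try rfl
      · omega
    · rw [dif_neg (by tauto)]
      simp only [List.map_cons, pclScan, pclDiff]
      rw [if_neg (by omega), if_pos ⟨by omega, trivial⟩]
      simp; omega

theorem pcl_loops_scan (pl : List Int) : ∀ n : Nat, ∀ index : Int, 1 ≤ index →
    ((pl.length : Int) - index).toNat = n →
    decide ((pl.length : Int) ≤ pclLoop2 pl pl.length (pclLoop1 pl pl.length index)) =
      pclScan ((PySem.List.pyRange index pl.length 1).map (pclDiff pl)) false := by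
  intro n
  induction n with
  | zero =>
    intro index h1 hn
    rw [pclLoop1, dif_neg (by omega), pclLoop2, dif_neg (by omega),
      PySem.List.pyRange_one_eq_nil (by omega)]
    simp [pclScan]; omega
  | succ m ih =>
    intro index h1 hn
    have hlt : index < (pl.length : Int) := by omega
    rw [pclLoop1, PySem.List.pyRange_one_cons hlt]
    by_cases hc : PySem.List.pyGetD pl (index - 1) 0 ≤ PySem.List.pyGetD pl index 0
    · rw [dif_pos ⟨hlt, hc⟩, ih (index + 1) (by omega) (by omega)]
      simp only [List.map_cons, pclScan, pclDiff]
      rw [if_neg (by omega), if_neg (by simp)]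
    · rw [dif_neg (by tauto),
        pcl_loop2_scan pl ((pl.length : Int) - index).toNat index h1 rfl,
        PySem.List.pyRange_one_cons hlt]
      simp only [List.map_cons, pclScan, pclDiff]
      rw [if_pos (by omega), if_pos (by omega)]

-- ===== VERDICT =====
theorem proper_coefficient_list_spec : Claim_equal_proper_coefficient_list := by
  intro pl _ hpre
  unfold Spec_proper_coefficient_list proper_coefficient_list proper_coefficient_list_alt
  by_cases hg : PySem.List.pyGetD pl 0 0 ≠ 1 ∨ PySem.List.pyGetD pl (-1) 0 ≠ 1
  · rw [if_pos hg, if_pos hg]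
  · rw [if_neg hg, if_neg hg]
    have hlen : 1 ≤ pl.length := List.length_pos_of_ne_nil hpre
    by_cases h1 : pl.length = 1
    · rw [pclLoop1, dif_neg (by simp [h1])]
      simp [h1]
    · have h2 : 2 ≤ pl.length := by omega
      have h1lt : (1 : Int) < (pl.length : Int) := by exact_mod_cast h2
      rw [if_neg (show ¬ ((pl.length == 1) = true) by simpa using h1)]
      unfold pclDiffs
      rw [PySem.List.pyRange_one_cons h1lt, List.map_cons, PySem.List.pyGetD_zero_cons]
      have hdiff : pclDiff pl 1 = PySem.List.pyGetD pl 1 0 - PySem.List.pyGetD pl 0 0 := by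
        unfold pclDiff; norm_num
      by_cases hd : PySem.List.pyGetD pl 0 0 ≤ PySem.List.pyGetD pl 1 0
      · conv_lhs => rw [pclLoop1]
        rw [dif_pos ⟨h1lt, by norm_num; exact hd⟩]
        have hge := pcl_loop1_ge pl (pl.length : Int) (1 + 1)
        rw [if_neg (by omega)]
        simp only [ge_iff_le]
        rw [pcl_loops_scan pl ((pl.length : Int) - (1 + 1)).toNat (1 + 1) (by omega) rfl,
          if_neg (show ¬ pclDiff pl 1 < 0 by rw [hdiff]; omega)]
        simp only [pclScan]
        rw [if_neg (show ¬ pclDiff pl 1 < 0 by rw [hdiff]; omega), if_neg (by simp)]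
      · conv_lhs => rw [pclLoop1]
        rw [dif_neg (by norm_num; intro _; omega)]
        rw [if_pos (by norm_num), if_pos (show pclDiff pl 1 < 0 by rw [hdiff]; omega)]
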